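-- pv_equiv track=rewrite | github.com/korneltomai/camelCase_to_snake_case_script | replace_camelcase.py | get_match_by_index
-- ===== SOURCE A (Python) =====
-- def get_match_by_index(matches_in_files, index):
--     current_index = 0
--     list_index = 0
--
--     for file, matches_in_file in matches_in_files.items():
--         for match in matches_in_file:
--             if current_index == index:
--                 return file, match
--             list_index += 1
--             current_index += 1
--         list_index = 0
--
--     return None
-- ===== SOURCE B (Python) =====
-- def get_match_by_index(matches_in_files, index):
--     flat = [(file, match) for file, matches in matches_in_files.items() for match in matches]
--     if 0 <= index < len(flat):
--         return flat[index]
--     return None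
-- ===== Notes on version B (the rewrite author's own statement) =====
-- stated objective: simpler
-- what changed: Replaces the counter-driven early-return double loop with a build-then-index decomposition: flatten the dict into a list of (file, match) pairs and index it with a range guard.
import Mathlib
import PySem

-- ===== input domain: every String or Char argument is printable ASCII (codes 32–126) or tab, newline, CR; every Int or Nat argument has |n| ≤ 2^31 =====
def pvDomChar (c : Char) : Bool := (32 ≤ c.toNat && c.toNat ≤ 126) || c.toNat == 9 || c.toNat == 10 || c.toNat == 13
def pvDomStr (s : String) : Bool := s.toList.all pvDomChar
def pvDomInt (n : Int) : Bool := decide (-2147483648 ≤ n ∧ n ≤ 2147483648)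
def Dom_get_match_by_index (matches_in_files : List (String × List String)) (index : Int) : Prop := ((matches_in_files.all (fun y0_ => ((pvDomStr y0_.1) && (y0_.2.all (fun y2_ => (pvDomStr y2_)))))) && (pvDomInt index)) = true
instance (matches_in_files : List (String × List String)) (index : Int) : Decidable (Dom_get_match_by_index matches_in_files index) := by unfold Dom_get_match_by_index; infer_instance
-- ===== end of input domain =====

-- B builds the flattened (file, match) list once and indexes it with a range guard,
-- replacing A's counter-driven early-return double loop (objective: simpler).

-- ===== PORT A =====
-- inner 'for match in matches_in_file' loop: returns the found pair, or the updated current_index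
def pvAInner (file : String) : List String → Int → Int → (String × String) ⊕ Int
  | [], cur, _ => .inr cur
  | m :: ms, cur, index =>
      if cur = index then .inl (file, m) else pvAInner file ms (cur + 1) index

-- outer 'for file, matches_in_file in matches_in_files.items()' loop
def pvAOuter : List (String × List String) → Int → Int → Option (String × String)
  | [], _, _ => none
  | (f, ms) :: rest, cur, index =>
      match pvAInner f ms cur index with
      | .inl r => some r
      | .inr cur' => pvAOuter rest cur' index

def get_match_by_index (matches_in_files : List (String × List String)) (index : Int) : Option (String × String) :=
  pvAOuter matches_in_files 0 index

-- ===== PORT B =====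
def get_match_by_index_alt (matches_in_files : List (String × List String)) (index : Int) : Option (String × String) :=
  let flat := matches_in_files.flatMap (fun p => p.2.map (fun m => (p.1, m)))
  if 0 ≤ index ∧ index < flat.length then flat[index.toNat]? else none

-- ===== PRECONDITION & SPEC =====
def Spec_get_match_by_index (matches_in_files : List (String × List String)) (index : Int) (out : Option (String × String)) : Prop := out = get_match_by_index_alt matches_in_files index
instance (matches_in_files : List (String × List String)) (index : Int) (out : Option (String × String)) : Decidable (Spec_get_match_by_index matches_in_files index out) := by unfold Spec_get_match_by_index; infer_instance

-- ===== CLAIM (what is proved, stated in full; the proofs are below) =====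
def Claim_equal_get_match_by_index : Prop := ∀ (matches_in_files : List (String × List String)) (index : Int), Dom_get_match_by_index matches_in_files index → Spec_get_match_by_index matches_in_files index (get_match_by_index matches_in_files index)

-- ===== LEMMAS AND PROOFS =====

theorem pvAInner_eq (file : String) (ms : List String) (cur index : Int) :
    pvAInner file ms cur index =
      if cur ≤ index ∧ index < cur + ms.length then
        .inl (file, ms[(index - cur).toNat]!)
      else .inr (cur + ms.length) := by
  induction ms generalizing cur with
  | nil =>
      simp only [pvAInner, List.length_nil]
      rw [if_neg (by omega)]
      simp
  | cons m ms ih =>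
      simp only [pvAInner, ih, List.length_cons]
      by_cases h : cur = index
      · subst h
        rw [if_pos rfl, if_pos (by push_cast; omega)]
        simp
      · rw [if_neg h]
        by_cases h2 : cur + 1 ≤ index ∧ index < cur + 1 + ms.length
        · rw [if_pos h2, if_pos (by push_cast; omega)]
          have : (index - cur).toNat = (index - (cur + 1)).toNat + 1 := by omega
          simp [this]
        · rw [if_neg h2, if_neg (by push_cast; omega)]
          congr 1
          push_cast
          ring

theorem pvAOuter_eq (mfs : List (String × List String)) (cur index : Int) :
    pvAOuter mfs cur index =
      (let flat := mfs.flatMap (fun p => p.2.map (fun m => (p.1, m)))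
       if cur ≤ index ∧ index < cur + flat.length then flat[(index - cur).toNat]? else none) := by
  induction mfs generalizing cur with
  | nil =>
      simp only [pvAOuter, List.flatMap_nil, List.length_nil]
      rw [if_neg (by omega)]
  | cons p rest ih =>
      obtain ⟨f, ms⟩ := p
      show (match pvAInner f ms cur index with
            | .inl r => some r
            | .inr cur' => pvAOuter rest cur' index) = _
      rw [pvAInner_eq]
      simp only [List.flatMap_cons, List.length_append, List.length_map]
      by_cases h : cur ≤ index ∧ index < cur + (ms.length : Int)
      · rw [if_pos h]
        show some (f, ms[(index - cur).toNat]!) = _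
        rw [if_pos (by push_cast; omega)]
        rw [List.getElem?_append_left (by simp; omega)]
        have hlt : (index - cur).toNat < ms.length := by omega
        simp [List.getElem!_eq_getElem?_getD, List.getElem?_eq_getElem hlt]
      · rw [if_neg h]
        show pvAOuter rest (cur + ms.length) index = _
        rw [ih]
        simp only []
        by_cases h2 : cur + (ms.length : Int) ≤ index ∧
            index < cur + (ms.length : Int) + (rest.flatMap (fun p => p.2.map (fun m => (p.1, m)))).length
        · rw [if_pos h2, if_pos (by push_cast; omega)]
          rw [List.getElem?_append_right (by simp; omega)]
          congr 1
          simp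
          omega
        · rw [if_neg h2, if_neg (by push_cast; omega)]

-- ===== VERDICT (by name: the statement is the Claim_ definition above) =====
theorem get_match_by_index_spec : Claim_equal_get_match_by_index := by
  intro mfs index _
  unfold Spec_get_match_by_index get_match_by_index get_match_by_index_alt
  rw [pvAOuter_eq]
  simp only []
  by_cases h : 0 ≤ index ∧ index < ((mfs.flatMap (fun p => p.2.map (fun m => (p.1, m)))).length : Int)
  · rw [if_pos (by omega), if_pos h]
    congr 1
    omega
  · rw [if_neg (by omega), if_neg h]
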